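-- pv_equiv track=rewrite | github.com/agatho/ida-wow-analyzer | analyzers/build_delta.py | _diff_error_codes
-- ===== SOURCE A (Python) =====
-- SEVERITY_SIGNIFICANT = "significant"
--
-- def _diff_error_codes(old_codes, new_codes):
--     """Diff error code sets between builds."""
--     changes = []
--     old_set = set(str(c) for c in old_codes)
--     new_set = set(str(c) for c in new_codes)
--
--     for code in sorted(new_set - old_set):
--         changes.append({
--             "category": "error_code",
--             "description": f"New error code: {code}",
--             "old": None,
--             "new": code,
--             "action": "add_error_code",
--             "severity": SEVERITY_SIGNIFICANT,
--         })
--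
--     for code in sorted(old_set - new_set):
--         changes.append({
--             "category": "error_code",
--             "description": f"Removed error code: {code}",
--             "old": code,
--             "new": None,
--             "action": "remove_error_code",
--             "severity": SEVERITY_SIGNIFICANT,
--         })
--
--     return changes
-- ===== SOURCE B (Python) =====
-- SEVERITY_SIGNIFICANT = "significant"
--
-- def _diff_error_codes(old_codes, new_codes):
--     """Diff error code sets: merge two sorted distinct lists with two pointers."""
--     olds = sorted({str(c) for c in old_codes})
--     news = sorted({str(c) for c in new_codes})
--     adds = []
--     removes = []
--     i = j = 0
--     while i < len(olds) or j < len(news):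
--         if j >= len(news) or (i < len(olds) and olds[i] < news[j]):
--             removes.append({
--                 "category": "error_code",
--                 "description": f"Removed error code: {olds[i]}",
--                 "old": olds[i],
--                 "new": None,
--                 "action": "remove_error_code",
--                 "severity": SEVERITY_SIGNIFICANT,
--             })
--             i += 1
--         elif i >= len(olds) or news[j] < olds[i]:
--             adds.append({
--                 "category": "error_code",
--                 "description": f"New error code: {news[j]}",
--                 "old": None,
--                 "new": news[j],
--                 "action": "add_error_code",
--                 "severity": SEVERITY_SIGNIFICANT,
--             })
--             j += 1
--         else:
--             i += 1
--             j += 1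
--     return adds + removes
-- ===== Notes on version B (the rewrite author's own statement) =====
-- stated objective: alternative
-- what changed: Instead of A's two set-difference-then-sort passes, B sorts each distinct code set once and walks both sorted lists with a two-pointer merge, classifying each code as removed, added or unchanged in one synchronized sweep, then returns adds + removes.
import Mathlib
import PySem

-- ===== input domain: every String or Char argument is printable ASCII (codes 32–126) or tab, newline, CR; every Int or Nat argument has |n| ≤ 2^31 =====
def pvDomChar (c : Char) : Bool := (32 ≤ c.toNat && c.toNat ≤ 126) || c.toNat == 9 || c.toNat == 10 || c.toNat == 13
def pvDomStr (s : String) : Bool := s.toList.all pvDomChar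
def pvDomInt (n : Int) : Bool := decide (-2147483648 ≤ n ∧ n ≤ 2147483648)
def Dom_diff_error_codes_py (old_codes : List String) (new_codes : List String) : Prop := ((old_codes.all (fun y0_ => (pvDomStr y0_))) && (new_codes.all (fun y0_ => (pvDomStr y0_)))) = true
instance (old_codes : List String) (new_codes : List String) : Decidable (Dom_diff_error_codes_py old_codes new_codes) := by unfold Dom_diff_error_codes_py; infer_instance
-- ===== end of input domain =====

-- B replaces A's two set-difference-then-sort passes by a two-pointer merge of the
-- two sorted distinct code lists (objective: alternative decomposition, same cost).

-- ===== PORT A =====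
-- the dict record for a new code (identical literal in both Pythons; shared)
def pvAddRec (code : String) : List (String × Option String) :=
  [("category", some "error_code"),
   ("description", some ("New error code: " ++ code)),
   ("old", none),
   ("new", some code),
   ("action", some "add_error_code"),
   ("severity", some "significant")]

-- the dict for a removed code
def pvRemRec (code : String) : List (String × Option String) :=
  [("category", some "error_code"),
   ("description", some ("Removed error code: " ++ code)),
   ("old", some code),
   ("new", none),
   ("action", some "remove_error_code"),
   ("severity", some "significant")]

def diff_error_codes_py (old_codes : List String) (new_codes : List String) : List (List (String × Option String)) :=
  let old_set := PySem.Set.ofList (old_codes.map (fun c => c))   -- str(c) on a str is c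
  let new_set := PySem.Set.ofList (new_codes.map (fun c => c))
  let changes := (PySem.List.sorted (PySem.Set.diff new_set old_set) (fun x => x) false).foldl
      (fun acc code => acc ++ [pvAddRec code]) []
  (PySem.List.sorted (PySem.Set.diff old_set new_set) (fun x => x) false).foldl
      (fun acc code => acc ++ [pvRemRec code]) changes

-- ===== PORT B =====
-- the while loop of Source B: two pointers over the sorted distinct lists; the pointers
-- become the remaining suffixes, appends become conses on the result pair
def pvTwoPtr : List String → List String → List (List (String × Option String)) × List (List (String × Option String))
  | [], [] => ([], [])
  | x :: xs, [] =>               -- j exhausted: remove olds[i]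
      let r := pvTwoPtr xs []
      (r.1, pvRemRec x :: r.2)
  | [], y :: ys =>               -- i exhausted: add news[j]
      let r := pvTwoPtr [] ys
      (pvAddRec y :: r.1, r.2)
  | x :: xs, y :: ys =>
      if x < y then              -- olds[i] < news[j]: removed code
        let r := pvTwoPtr xs (y :: ys)
        (r.1, pvRemRec x :: r.2)
      else if y < x then         -- news[j] < olds[i]: new code
        let r := pvTwoPtr (x :: xs) ys
        (pvAddRec y :: r.1, r.2)
      else                       -- equal: unchanged, advance both
        pvTwoPtr xs ys
  termination_by xs ys => xs.length + ys.length

def diff_error_codes_py_alt (old_codes : List String) (new_codes : List String) : List (List (String × Option String)) :=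
  let olds := PySem.List.sorted (PySem.Set.ofList (old_codes.map (fun c => c))) (fun x => x) false
  let news := PySem.List.sorted (PySem.Set.ofList (new_codes.map (fun c => c))) (fun x => x) false
  let r := pvTwoPtr olds news
  r.1 ++ r.2

-- ===== PRECONDITION & SPEC =====
def Spec_diff_error_codes_py (old_codes : List String) (new_codes : List String) (out : List (List (String × Option String))) : Prop := out = diff_error_codes_py_alt old_codes new_codes
instance (old_codes : List String) (new_codes : List String) (out : List (List (String × Option String))) : Decidable (Spec_diff_error_codes_py old_codes new_codes out) := by unfold Spec_diff_error_codes_py; infer_instance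

-- ===== CLAIM (what is proved, stated in full; the proofs are below) =====
def Claim_equal_diff_error_codes_py : Prop := ∀ (old_codes : List String) (new_codes : List String), Dom_diff_error_codes_py old_codes new_codes → Spec_diff_error_codes_py old_codes new_codes (diff_error_codes_py old_codes new_codes)

-- ===== LEMMAS AND PROOFS =====

-- on strictly sorted lists the two-pointer merge computes the two filtered differences
theorem pvTwoPtr_spec (xs ys : List String)
    (hx : xs.Pairwise (fun a b => a < b)) (hy : ys.Pairwise (fun a b => a < b)) :
    pvTwoPtr xs ys =
      ((ys.filter (fun z => !xs.contains z)).map pvAddRec,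
       (xs.filter (fun z => !ys.contains z)).map pvRemRec) := by
  fun_induction pvTwoPtr with
  | case1 => simp
  | case2 x xs r ih =>
      rw [List.pairwise_cons] at hx
      simp [r, ih hx.2 hy]
  | case3 y ys r ih =>
      rw [List.pairwise_cons] at hy
      simp [r, ih hx hy.2]
  | case4 x xs y ys hxy r ih =>
      rw [List.pairwise_cons] at hx
      have hxny : ∀ z ∈ y :: ys, z ≠ x := by
        intro z hz
        rw [List.mem_cons] at hz
        rcases hz with rfl | hz
        · exact hxy.ne'
        · have hlt := (List.pairwise_cons.mp hy).1 z hz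
          intro h
          rw [h] at hlt
          exact absurd hxy (not_lt_of_gt hlt)
      simp only [r, ih hx.2 hy]
      simp only [Prod.mk.injEq]
      refine ⟨?_, ?_⟩
      · congr 1
        refine (List.filter_congr ?_)
        intro z hz
        simp [(hxny z hz)]
      · rw [List.filter_cons]
        have hxnot : ¬ x ∈ y :: ys := fun hm => (hxny x hm) rfl
        simp [hxnot]
  | case5 x xs y ys hxy hyx r ih =>
      rw [List.pairwise_cons] at hy
      have hynx : ∀ z ∈ x :: xs, z ≠ y := by
        intro z hz
        rw [List.mem_cons] at hz
        rcases hz with rfl | hz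
        · exact hyx.ne'
        · have hlt := (List.pairwise_cons.mp hx).1 z hz
          intro h
          rw [h] at hlt
          exact absurd hyx (not_lt_of_gt hlt)
      simp only [r, ih hx hy.2]
      simp only [Prod.mk.injEq]
      refine ⟨?_, ?_⟩
      · rw [List.filter_cons]
        have hynot : ¬ y ∈ x :: xs := fun hm => (hynx y hm) rfl
        simp [hynot]
      · congr 1
        refine (List.filter_congr ?_)
        intro z hz
        simp [(hynx z hz)]
  | case6 x xs y ys hxy hyx ih =>
      have hxy' : x = y := le_antisymm (not_lt.mp hyx) (not_lt.mp hxy)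
      subst hxy'
      rw [List.pairwise_cons] at hx hy
      rw [ih hx.2 hy.2]
      simp only [Prod.mk.injEq]
      refine ⟨?_, ?_⟩
      · rw [List.filter_cons]
        have : ¬ ((!(x :: xs).contains x) = true) := by simp
        simp only [if_neg this]
        congr 1
        refine (List.filter_congr ?_).symm
        intro z hz
        simp [(hy.1 z hz).ne']
      · rw [List.filter_cons]
        have : ¬ ((!(x :: ys).contains x) = true) := by simp
        simp only [if_neg this]
        congr 1
        refine (List.filter_congr ?_).symm
        intro z hz
        simp [(hx.1 z hz).ne']

-- a strictly increasing list that is a permutation of a nodup list with the same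
-- membership names sorted(list)
theorem pv_sorted_eq (xs ys : List String) (hx : xs.Nodup)
    (hy : ys.Pairwise (fun a b => a < b))
    (hmem : ∀ z, z ∈ ys ↔ z ∈ xs) :
    PySem.List.sorted xs (fun x => x) false = ys := by
  refine PySem.List.sorted_eq_of_perm_of_pairwise_lt xs ys (fun x => x) ?_ hy
  have hynd : ys.Nodup := hy.imp (fun h => ne_of_lt h)
  exact (List.perm_ext_iff_of_nodup hynd hx).mpr hmem

-- sorted(set) lists are strictly increasing
theorem pv_sorted_strict (s : PySem.Set String) (hs : s.Nodup) :
    (PySem.List.sorted s (fun x => x) false).Pairwise (fun a b => a < b) := by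
  have hperm := PySem.List.sorted_perm s (fun x : String => x) false
  have hle := PySem.List.sorted_pairwise s (fun x : String => x)
  have hnd : (PySem.List.sorted s (fun x => x) false).Nodup := hperm.nodup_iff.mpr hs
  exact (hle.and hnd).imp (fun h => lt_of_le_of_ne h.1 h.2)

-- filtering one sorted set list by non-membership in the other sorted set list
-- equals sorting the set difference
theorem pv_filter_sorted (s t : PySem.Set String) (ht : t.Nodup) :
    (PySem.List.sorted t (fun x => x) false).filter
        (fun z => !(PySem.List.sorted s (fun x => x) false).contains z) =
      PySem.List.sorted (PySem.Set.diff t s) (fun x => x) false := by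
  refine Eq.symm (pv_sorted_eq _ _ (PySem.Set.nodup_diff t s ht) ((pv_sorted_strict t ht).filter _) ?_)
  intro z
  rw [List.mem_filter, PySem.List.mem_sorted, PySem.Set.mem_diff]
  simp only [Bool.not_eq_eq_eq_not, Bool.not_true, List.contains_eq_any_beq, List.any_eq_false]
  constructor
  · rintro ⟨h1, h2⟩
    refine ⟨h1, fun hm => ?_⟩
    have := h2 z (by rw [PySem.List.mem_sorted]; exact hm)
    simp at this
  · rintro ⟨h1, h2⟩
    refine ⟨h1, fun w hw => ?_⟩
    rw [PySem.List.mem_sorted] at hw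
    simp [beq_iff_eq]
    exact fun h => h2 (h ▸ hw)

-- ===== VERDICT (by name: the statement is the Claim_ definition above) =====
theorem diff_error_codes_py_spec : Claim_equal_diff_error_codes_py := by
  intro old_codes new_codes _
  unfold Spec_diff_error_codes_py diff_error_codes_py diff_error_codes_py_alt
  simp only
  set old_set := PySem.Set.ofList (old_codes.map (fun c => c)) with hOld
  set new_set := PySem.Set.ofList (new_codes.map (fun c => c)) with hNew
  have hOldNd : old_set.Nodup := PySem.Set.nodup_ofList _
  have hNewNd : new_set.Nodup := PySem.Set.nodup_ofList _
  rw [pvTwoPtr_spec _ _ (pv_sorted_strict _ hOldNd) (pv_sorted_strict _ hNewNd),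
    PySem.List.foldl_append_singleton_eq_map, PySem.List.foldl_append_singleton_eq_map,
    pv_filter_sorted old_set new_set hNewNd,
    pv_filter_sorted new_set old_set hOldNd]
  simp
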